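-- pv_equiv track=rewrite | github.com/mariabv/MariaVillafranca_labb321 | oversattning.py | bebisprak
-- ===== SOURCE A (Python) =====
-- def bebisprak(inrad):
-- 	vokaler = 'aouaeiyaoAOUaEIYao'
-- 	konsonanter = 'bcdfghjklmnpqrstvwxzBCDFGHJKLMNPQRSTVWXZ'
-- 	utr = ""
-- 	j = 0
-- 	aa = []
-- 	for word in inrad.split():
-- 		bb = ""
-- 		log = True
-- 		for s in word:
-- 			if s in konsonanter and log:
-- 				bb += s
-- 			elif s in vokaler and log:
-- 				bb += s
-- 				log = False
-- 		aa.append(bb+bb+bb)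
-- 		j += 1
-- 	utr = ' '.join(aa)
-- 	return utr
-- ===== SOURCE B (Python) =====
-- def bebisprak(inrad):
--     VOW = set('aouaeiyaoAOUaEIYao')
--     KON = set('bcdfghjklmnpqrstvwxzBCDFGHJKLMNPQRSTVWXZ')
--     pieces = []
--     for word in inrad.split():
--         i = next((k for k, c in enumerate(word) if c in VOW), None)
--         if i is None:
--             pre = ''.join(c for c in word if c in KON)
--         else:
--             pre = ''.join(c for c in word[:i] if c in KON) + word[i]
--         pieces.append(pre * 3)
--     return ' '.join(pieces)
-- ===== Notes on version B (the rewrite author's own statement) =====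
-- stated objective: alternative
-- what changed: Replaces A's single-pass stop-flag accumulator loop per word with an explicit find-first-vowel step followed by a separate consonant filter of the prefix (all consonants when no vowel exists).
import Mathlib
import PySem

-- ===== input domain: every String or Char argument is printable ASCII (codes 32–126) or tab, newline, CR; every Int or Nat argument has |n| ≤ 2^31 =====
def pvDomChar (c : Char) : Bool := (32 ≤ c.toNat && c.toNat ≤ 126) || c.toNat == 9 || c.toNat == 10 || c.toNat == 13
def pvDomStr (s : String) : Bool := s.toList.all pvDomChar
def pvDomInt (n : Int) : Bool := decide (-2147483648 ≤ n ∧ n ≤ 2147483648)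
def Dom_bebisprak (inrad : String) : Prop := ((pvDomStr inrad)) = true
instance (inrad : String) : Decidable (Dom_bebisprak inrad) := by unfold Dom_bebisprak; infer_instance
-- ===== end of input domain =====

-- B replaces A's one-pass stop-flag loop per word by find-first-vowel + consonant filter of the prefix; same asymptotic cost (objective: alternative).

-- ===== PORT A =====
def pvVok : List Char := "aouaeiyaoAOUaEIYao".toList
def pvKon : List Char := "bcdfghjklmnpqrstvwxzBCDFGHJKLMNPQRSTVWXZ".toList

-- the inner 'for s in word' loop body of A, with state (bb, log)
def bebisprakStep (st : List Char × Bool) (s : Char) : List Char × Bool :=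
  if pvKon.contains s && st.2 then (st.1 ++ [s], st.2)
  else if pvVok.contains s && st.2 then (st.1 ++ [s], false)
  else st

def bebisprak (inrad : String) : String :=
  let aa := (PySem.Str.split₀ inrad).map (fun word =>
    let bb := (word.toList.foldl bebisprakStep ([], true)).1
    String.ofList (bb ++ bb ++ bb))
  PySem.Str.join " " aa

-- ===== PORT B =====
-- B per word: index of the first vowel (none if absent); consonant-filter the prefix before it and append that vowel, or filter the whole word
def bebisprakAltWord (w : List Char) : List Char :=
  match w.findIdx? (fun c => pvVok.contains c) with
  | none => w.filter (fun c => pvKon.contains c)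
  | some i => (w.take i).filter (fun c => pvKon.contains c) ++ (w.drop i).take 1

def bebisprak_alt (inrad : String) : String :=
  PySem.Str.join " " ((PySem.Str.split₀ inrad).map (fun word =>
    let pre := bebisprakAltWord word.toList
    String.ofList (pre ++ pre ++ pre)))

-- ===== PRECONDITION & SPEC =====
def Spec_bebisprak (inrad : String) (out : String) : Prop := out = bebisprak_alt inrad
instance (inrad : String) (out : String) : Decidable (Spec_bebisprak inrad out) := by unfold Spec_bebisprak; infer_instance

-- ===== CLAIM (what is proved, stated in full; the proofs are below) =====
def Claim_equal_bebisprak : Prop := ∀ (inrad : String), Dom_bebisprak inrad → Spec_bebisprak inrad (bebisprak inrad)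

-- ===== LEMMAS AND PROOFS =====

-- the vowel and consonant lists are disjoint
lemma pv_disjoint (c : Char) (h : c ∈ pvKon) : c ∉ pvVok := by
  have hall : pvKon.all (fun c => !pvVok.contains c) = true := by decide
  simpa using List.all_eq_true.mp hall c h

-- once the flag is false, A's loop changes nothing
lemma fold_false (w : List Char) (acc : List Char) :
    w.foldl bebisprakStep (acc, false) = (acc, false) := by
  induction w generalizing acc with
  | nil => rfl
  | cons c cs ih => simp [List.foldl, bebisprakStep, ih]

-- A's loop from a true flag appends exactly B's per-word result
lemma fold_true (w : List Char) (acc : List Char) :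
    (w.foldl bebisprakStep (acc, true)).1 = acc ++ bebisprakAltWord w := by
  induction w generalizing acc with
  | nil => simp [bebisprakAltWord]
  | cons c cs ih =>
    by_cases hv : c ∈ pvVok
    · have hk : c ∉ pvKon := fun h => pv_disjoint c h hv
      simp [List.foldl, bebisprakStep, hv, hk, fold_false, bebisprakAltWord,
        List.findIdx?_cons]
    · by_cases hk : c ∈ pvKon
      · rw [show (c :: cs).foldl bebisprakStep (acc, true)
              = cs.foldl bebisprakStep (acc ++ [c], true) by
            simp [List.foldl, bebisprakStep, hk]]
        rw [ih (acc ++ [c])]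
        simp only [bebisprakAltWord, List.findIdx?_cons]
        cases hfi : cs.findIdx? (fun c => pvVok.contains c) with
        | none =>
          have hv' : pvVok.contains c = false := by simpa using hv
          simp [hv', hk]
          rw [if_neg hv]
        | some i =>
          have hv' : pvVok.contains c = false := by simpa using hv
          simp [hv', hk, List.take_succ_cons, List.drop_succ_cons]
          rw [if_neg hv]
          simp [hk, List.take_succ_cons, List.drop_succ_cons]
      · rw [show (c :: cs).foldl bebisprakStep (acc, true)
              = cs.foldl bebisprakStep (acc, true) by
            simp [List.foldl, bebisprakStep, hk, hv]]
        rw [ih acc]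
        simp only [bebisprakAltWord, List.findIdx?_cons]
        cases hfi : cs.findIdx? (fun c => pvVok.contains c) with
        | none =>
          have hv' : pvVok.contains c = false := by simpa using hv
          simp [hv', hk]
          rw [if_neg hv]
        | some i =>
          have hv' : pvVok.contains c = false := by simpa using hv
          simp [hv', hk, List.take_succ_cons, List.drop_succ_cons]
          rw [if_neg hv]
          simp [hk, List.take_succ_cons, List.drop_succ_cons]

lemma word_eq (w : List Char) :
    (w.foldl bebisprakStep ([], true)).1 = bebisprakAltWord w := by
  simpa using fold_true w []

-- ===== VERDICT (by name: the statement is the Claim_ definition above) =====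
theorem bebisprak_spec : Claim_equal_bebisprak := by
  intro inrad _
  unfold Spec_bebisprak bebisprak bebisprak_alt
  simp only [word_eq]
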